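-- pv_equiv track=rewrite | github.com/lzj19910802/vs-code | Data check/slice txt.py | split_text_into_parts
-- ===== SOURCE A (Python) =====
-- def split_text_into_parts(text, num_parts):
--     total_length = len(text)
--     part_size = total_length // num_parts
--     extra_chars = total_length % num_parts
--
--     parts = []
--     start = 0
--
--     for _ in range(num_parts):
--         end = start + part_size
--         if extra_chars > 0:
--             end += 1
--             extra_chars -= 1
--
--         parts.append(text[start:end])
--         start = end
--
--     return parts
-- ===== SOURCE B (Python) =====
-- def split_text_into_parts(text, num_parts):
--     part_size = len(text) // num_parts
--     extra = len(text) % num_parts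
--     return [text[i * part_size + min(i, extra):(i + 1) * part_size + min(i + 1, extra)]
--             for i in range(num_parts)]
-- ===== Notes on version B (the rewrite author's own statement) =====
-- stated objective: simpler
-- what changed: Replaces A's running start/extra accumulator loop with a single comprehension computing each slice's boundaries by the closed form i*part_size + min(i, extra).
import Mathlib
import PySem

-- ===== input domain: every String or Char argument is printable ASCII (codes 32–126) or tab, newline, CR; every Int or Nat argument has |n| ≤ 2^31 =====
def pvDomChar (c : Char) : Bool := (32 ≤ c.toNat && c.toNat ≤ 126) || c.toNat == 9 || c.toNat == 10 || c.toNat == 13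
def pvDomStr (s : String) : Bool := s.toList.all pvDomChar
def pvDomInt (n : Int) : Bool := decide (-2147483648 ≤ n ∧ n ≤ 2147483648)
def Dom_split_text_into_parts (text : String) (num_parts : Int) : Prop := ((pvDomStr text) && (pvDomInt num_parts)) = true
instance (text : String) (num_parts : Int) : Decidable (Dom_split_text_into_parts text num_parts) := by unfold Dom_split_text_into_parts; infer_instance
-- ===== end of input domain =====

-- B replaces A's running start/extra accumulator with closed-form slice boundaries (objective: simpler).

-- ===== PORT A =====
-- A's loop body as a step on the state (parts, start, extra_chars).
def pvStepA (chars : List Char) (part_size : Int)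
    (st : List String × Int × Int) (_ : Int) : List String × Int × Int :=
  let parts := st.1
  let start := st.2.1
  let extra := st.2.2
  let e0 := start + part_size
  let e := if extra > 0 then e0 + 1 else e0
  let extra' := if extra > 0 then extra - 1 else extra
  (parts ++ [String.ofList (PySem.List.slice chars (some start) (some e))], e, extra')

def split_text_into_parts (text : String) (num_parts : Int) : List String :=
  let chars := text.toList
  let total_length : Int := chars.length
  let part_size := PySem.Int.floordiv total_length num_parts
  let extra_chars := PySem.Int.mod total_length num_parts
  ((PySem.List.pyRange 0 num_parts 1).foldl (pvStepA chars part_size)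
    ([], 0, extra_chars)).1

-- ===== PORT B =====
def split_text_into_parts_alt (text : String) (num_parts : Int) : List String :=
  let chars := text.toList
  let part_size := PySem.Int.floordiv (chars.length : Int) num_parts
  let extra := PySem.Int.mod (chars.length : Int) num_parts
  (PySem.List.pyRange 0 num_parts 1).map (fun i =>
    String.ofList (PySem.List.slice chars
      (some (i * part_size + min i extra))
      (some ((i + 1) * part_size + min (i + 1) extra))))

-- ===== PRECONDITION & SPEC =====
-- Pre_ excludes exactly num_parts = 0, where Python A raises ZeroDivisionError.
def Pre_split_text_into_parts (text : String) (num_parts : Int) : Prop := num_parts ≠ 0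
instance (text : String) (num_parts : Int) : Decidable (Pre_split_text_into_parts text num_parts) := by unfold Pre_split_text_into_parts; infer_instance
def pvWitness_split_text_into_parts : String × Int := ("hello", 3)

def Spec_split_text_into_parts (text : String) (num_parts : Int) (out : List String) : Prop := out = split_text_into_parts_alt text num_parts
instance (text : String) (num_parts : Int) (out : List String) : Decidable (Spec_split_text_into_parts text num_parts out) := by unfold Spec_split_text_into_parts; infer_instance

-- ===== CLAIM (what is proved, stated in full; the proofs are below) =====
def Claim_equal_split_text_into_parts : Prop := ∀ (text : String) (num_parts : Int), Dom_split_text_into_parts text num_parts → Pre_split_text_into_parts text num_parts → Spec_split_text_into_parts text num_parts (split_text_into_parts text num_parts)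

-- ===== LEMMAS AND PROOFS =====

-- Invariant: starting from B's closed-form state at index i, A's fold over range(i, n)
-- appends exactly B's slices for indices i..n-1.
theorem pvFoldA_inv (chars : List Char) (ps e : Int) (he : 0 ≤ e)
    (n i : Int) (hi : 0 ≤ i) (acc : List String) :
    ((PySem.List.pyRange i n 1).foldl (pvStepA chars ps)
      (acc, i * ps + min i e, e - min i e)).1
    = acc ++ (PySem.List.pyRange i n 1).map (fun j =>
        String.ofList (PySem.List.slice chars
          (some (j * ps + min j e)) (some ((j + 1) * ps + min (j + 1) e)))) := by
  by_cases h : n ≤ i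
  · rw [PySem.List.pyRange_one_eq_nil h]; simp
  · rw [not_le] at h
    rw [PySem.List.pyRange_one_cons h]
    have key : pvStepA chars ps (acc, i * ps + min i e, e - min i e) i
        = (acc ++ [String.ofList (PySem.List.slice chars
            (some (i * ps + min i e)) (some ((i + 1) * ps + min (i + 1) e)))],
           (i + 1) * ps + min (i + 1) e, e - min (i + 1) e) := by
      unfold pvStepA
      by_cases hc : e - min i e > 0
      · have hlt : i < e := by omega
        simp only [if_pos hc]
        have h1 : min i e = i := by omega
        have h2 : min (i + 1) e = i + 1 := by omega
        rw [h1, h2]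
        refine Prod.ext ?_ (Prod.ext ?_ ?_) <;> simp <;> ring_nf
      · have hge : e ≤ i := by omega
        simp only [if_neg hc]
        have h1 : min i e = e := by omega
        have h2 : min (i + 1) e = e := by omega
        rw [h1, h2]
        refine Prod.ext ?_ (Prod.ext ?_ ?_) <;> simp <;> ring_nf
    rw [List.foldl_cons, key,
        pvFoldA_inv chars ps e he n (i + 1) (by omega) _]
    simp
termination_by (n - i).toNat
decreasing_by omega

-- ===== VERDICT (by name: the statement is the Claim_ definition above) =====
theorem split_text_into_parts_spec : Claim_equal_split_text_into_parts := by
  intro text n _ hpre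
  unfold Spec_split_text_into_parts split_text_into_parts split_text_into_parts_alt
  simp only []
  rcases lt_trichotomy n 0 with hneg | hz | hpos
  · rw [PySem.List.pyRange_one_eq_nil (by omega)]
    simp
  · exact absurd hz hpre
  · have he : 0 ≤ PySem.Int.mod (text.toList.length : Int) n :=
      PySem.Int.mod_nonneg _ hpos
    have := pvFoldA_inv text.toList
      (PySem.Int.floordiv (text.toList.length : Int) n)
      (PySem.Int.mod (text.toList.length : Int) n) he n 0 le_rfl []
    rw [min_eq_left he] at this
    simpa using this
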